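-- pv_equiv track=rewrite | github.com/NickOneRG/LeetCode | LeetCode/inte/TikTok_ugookoh.py | minCommon
-- ===== SOURCE A (Python) =====
-- from typing import List
--
-- def minCommon(n: int, data: List[int]) -> List[int]:
--     res, count = [], 1
--
--     for i in range(n):
--         count, memo = i + 1, []
--
--         for z in range(0, len(data) - count + 1):
--             memo.append(data[z:z + count])
--
--         memo_set = [set(lst) for lst in memo]
--         common = list(set.intersection(*memo_set))
--
--         if   common == []:     res.append(-1)
--         elif len(common) == 1: res.append(common[0])
--         else:                  res.append(min(common))
--
--
--     return res
-- ===== SOURCE B (Python) =====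
-- from typing import List
--
-- def _threshold(v: int, data: List[int]) -> int:
--     last, t = -1, 0
--     for i, x in enumerate(data):
--         if x == v:
--             t = max(t, i - last)
--             last = i
--     return max(t, len(data) - last)
--
-- def minCommon(n: int, data: List[int]) -> List[int]:
--     thr = {}
--     for v in data:
--         if v not in thr:
--             thr[v] = _threshold(v, data)
--     res = []
--     for k in range(1, n + 1):
--         candidates = [v for v in thr if thr[v] <= k]
--         res.append(min(candidates) if candidates else -1)
--     return res
-- ===== Notes on version B (the rewrite author's own statement) =====
-- stated objective: faster
-- what changed: Instead of rebuilding every window of every size and intersecting them as sets (per k), B computes once per distinct value the smallest window size that contains it everywhere (its largest occurrence gap, including both boundaries) and answers each k as the minimum value whose threshold is at most k.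
import Mathlib
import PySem

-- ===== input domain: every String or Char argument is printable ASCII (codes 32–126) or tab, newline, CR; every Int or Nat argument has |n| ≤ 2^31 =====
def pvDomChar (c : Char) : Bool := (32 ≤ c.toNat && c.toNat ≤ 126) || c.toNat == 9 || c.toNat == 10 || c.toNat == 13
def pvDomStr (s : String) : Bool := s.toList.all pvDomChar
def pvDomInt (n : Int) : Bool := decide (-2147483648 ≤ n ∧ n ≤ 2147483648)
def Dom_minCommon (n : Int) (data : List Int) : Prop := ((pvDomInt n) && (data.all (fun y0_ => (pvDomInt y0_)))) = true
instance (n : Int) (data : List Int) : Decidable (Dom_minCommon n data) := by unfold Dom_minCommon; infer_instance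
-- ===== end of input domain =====

-- B replaces A's per-k rebuild-all-windows-and-intersect-sets pass by a per-value "required
-- window size" computed from occurrence gaps, then answers each k by filtering those thresholds
-- (objective: faster, asymptotic).

-- ===== PORT A =====
def minCommon (n : Int) (data : List Int) : List Int :=
  (PySem.List.pyRange 0 n 1).foldl (fun res i =>
    let count := i + 1
    let memo : List (List Int) :=
      (PySem.List.pyRange 0 ((data.length : Int) - count + 1) 1).foldl
        (fun memo z => memo ++ [PySem.List.slice data (some z) (some (z + count))]) []
    let memoSet : List (PySem.Set Int) := memo.map (fun lst => PySem.Set.ofList lst)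
    let common : List Int :=
      match memoSet with
      | [] => []  -- Python raises TypeError here (set.intersection with no args); excluded by Pre_
      | s :: rest => rest.foldl (fun acc t => PySem.Set.inter acc t) s
    if common = [] then res ++ [-1]
    else if common.length = 1 then res ++ [common.headD 0]
    else res ++ [(PySem.List.min? common (fun x => x)).getD 0]) []

-- ===== PORT B =====
-- helper _threshold of Source B: smallest window size k such that v occurs in every k-window
def pvThreshold (v : Int) (data : List Int) : Int :=
  let st := (PySem.List.enumerate data).foldl
    (fun (st : Int × Int) ix => if ix.2 = v then (ix.1, max st.2 (ix.1 - st.1)) else st)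
    (-1, 0)
  max st.2 ((data.length : Int) - st.1)

def minCommon_alt (n : Int) (data : List Int) : List Int :=
  let thr : PySem.Dict Int Int :=
    data.foldl (fun thr v => if thr.contains v then thr else thr.insert v (pvThreshold v data))
      PySem.Dict.empty
  (PySem.List.pyRange 1 (n + 1) 1).foldl (fun res k =>
    let candidates : List Int := thr.keys.filter (fun v => decide (thr.getD v 0 ≤ k))
    res ++ [match PySem.List.min? candidates (fun x => x) with
            | some m => m
            | none => -1]) []

-- ===== PRECONDITION & SPEC =====
-- Pre_ excludes exactly the inputs where A raises: if n > len(data) some iteration has an empty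
-- window list and set.intersection(*[]) raises TypeError.
def Pre_minCommon (n : Int) (data : List Int) : Prop := n ≤ (data.length : Int)
instance (n : Int) (data : List Int) : Decidable (Pre_minCommon n data) := by
  unfold Pre_minCommon; infer_instance

def pvWitness_minCommon : Int × List Int := (2, [1, 2, 1])

def Spec_minCommon (n : Int) (data : List Int) (out : List Int) : Prop := out = minCommon_alt n data
instance (n : Int) (data : List Int) (out : List Int) : Decidable (Spec_minCommon n data out) := by
  unfold Spec_minCommon; infer_instance

-- ===== CLAIM (what is proved, stated in full; the proofs are below) =====
def Claim_equal_minCommon : Prop := ∀ (n : Int) (data : List Int), Dom_minCommon n data → Pre_minCommon n data → Spec_minCommon n data (minCommon n data)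

-- ===== LEMMAS AND PROOFS =====

-- generic: an append-singleton foldl is a map
theorem pvFoldlAppend {α β : Type} (f : α → β) :
    ∀ (l : List α) (acc : List β), l.foldl (fun r x => r ++ [f x]) acc = acc ++ l.map f := by
  intro l
  induction l with
  | nil => intro acc; simp
  | cons y ys ih => intro acc; simp [List.foldl_cons, ih]

-- occurrence positions of x in a list, starting at index s
def pvPos (x : Int) : List Int → Int → List Int
  | [], _ => []
  | y :: ys, s => if y = x then s :: pvPos x ys (s + 1) else pvPos x ys (s + 1)

-- running max gap between consecutive positions (sentinel prev)
def pvMaxGap : Int → List Int → Int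
  | _, [] => 0
  | prev, p :: ps => max (p - prev) (pvMaxGap p ps)

-- last position (sentinel prev if none)
def pvLast : Int → List Int → Int
  | prev, [] => prev
  | _, p :: ps => pvLast p ps

theorem pvPos_bounds (x : Int) :
    ∀ (l : List Int) (s p : Int), p ∈ pvPos x l s → s ≤ p ∧ p < s + l.length := by
  intro l
  induction l with
  | nil => intro s p hp; simp [pvPos] at hp
  | cons y ys ih =>
    intro s p hp
    simp only [pvPos] at hp
    by_cases hy : y = x
    · rw [if_pos hy] at hp
      rcases List.mem_cons.1 hp with rfl | hp'
      · simp only [List.length_cons]; push_cast; omega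
      · have := ih (s + 1) p hp'
        simp only [List.length_cons]; push_cast; push_cast at this; omega
    · rw [if_neg hy] at hp
      have := ih (s + 1) p hp
      simp only [List.length_cons]; push_cast; push_cast at this; omega

theorem pvPos_pairwise (x : Int) :
    ∀ (l : List Int) (s : Int), (pvPos x l s).Pairwise (· < ·) := by
  intro l
  induction l with
  | nil => intro s; simp [pvPos]
  | cons y ys ih =>
    intro s
    simp only [pvPos]
    by_cases hy : y = x
    · rw [if_pos hy]
      refine List.Pairwise.cons ?_ (ih (s + 1))
      intro q hq
      have := pvPos_bounds x ys (s + 1) q hq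
      omega
    · rw [if_neg hy]; exact ih (s + 1)

theorem pvPos_ne_nil_iff (x : Int) :
    ∀ (l : List Int) (s : Int), pvPos x l s ≠ [] ↔ x ∈ l := by
  intro l
  induction l with
  | nil => intro s; simp [pvPos]
  | cons y ys ih =>
    intro s
    simp only [pvPos]
    by_cases hy : y = x
    · rw [if_pos hy]; simp [hy]
    · rw [if_neg hy]
      rw [ih (s + 1), List.mem_cons]
      constructor
      · exact Or.inr
      · rintro (rfl | h)
        · exact absurd rfl hy
        · exact h

theorem pvPos_take (x : Int) :
    ∀ (l : List Int) (m : Nat) (s : Int),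
      pvPos x (l.take m) s = (pvPos x l s).filter (fun p => decide (p < s + (m : Int))) := by
  intro l
  induction l with
  | nil => intro m s; simp [pvPos]
  | cons y ys ih =>
    intro m s
    cases m with
    | zero =>
      simp only [List.take_zero, Nat.cast_zero, add_zero, pvPos]
      symm
      rw [List.filter_eq_nil_iff]
      intro p hp
      have hb : s ≤ p := by
        by_cases hy : y = x
        · rw [if_pos hy] at hp
          rcases List.mem_cons.1 hp with rfl | hp'
          · exact le_refl _
          · have := pvPos_bounds x ys (s + 1) p hp'; omega
        · rw [if_neg hy] at hp
          have := pvPos_bounds x ys (s + 1) p hp; omega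
      simp; omega
    | succ m =>
      simp only [List.take_succ_cons, pvPos]
      by_cases hy : y = x
      · rw [if_pos hy, if_pos hy, ih m (s + 1), List.filter_cons]
        simp only [Nat.cast_succ]
        rw [if_pos (by simp only [decide_eq_true_eq]; omega)]
        congr 1
        apply List.filter_congr
        intro p _; simp only [decide_eq_decide]; omega
      · rw [if_neg hy, if_neg hy, ih m (s + 1)]
        apply List.filter_congr
        intro p _; simp only [decide_eq_decide]; omega

theorem pvPos_drop (x : Int) :
    ∀ (l : List Int) (m : Nat) (s : Int),
      pvPos x (l.drop m) (s + (m : Int)) = (pvPos x l s).filter (fun p => decide (s + (m : Int) ≤ p)) := by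
  intro l
  induction l with
  | nil => intro m s; simp [pvPos]
  | cons y ys ih =>
    intro m s
    cases m with
    | zero =>
      simp only [List.drop_zero, Nat.cast_zero, add_zero]
      symm
      rw [List.filter_eq_self]
      intro p hp
      have : s ≤ p ∧ p < s + (y :: ys).length := pvPos_bounds x (y :: ys) s p hp
      simp; omega
    | succ m =>
      simp only [List.drop_succ_cons]
      have h1 : s + ((m : Int) + 1) = (s + 1) + (m : Int) := by ring
      simp only [Nat.cast_succ, h1, ih m (s + 1)]
      simp only [pvPos]
      by_cases hy : y = x
      · rw [if_pos hy, List.filter_cons]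
        rw [if_neg (by simp only [decide_eq_true_eq]; omega)]
      · rw [if_neg hy]

-- membership in a window slice, via positions
theorem pvMemSlice (x : Int) (data : List Int) (z k : Int) (hz : 0 ≤ z) (hk : 0 ≤ k) :
    x ∈ PySem.List.slice data (some z) (some (z + k)) ↔
      ∃ p ∈ pvPos x data 0, z ≤ p ∧ p < z + k := by
  rw [PySem.List.slice_toNat data hz (by omega)]
  have hzz : ((z.toNat : Int)) = z := Int.toNat_of_nonneg hz
  have hkk : (((z + k).toNat - z.toNat : Nat) : Int) = k := by omega
  rw [← pvPos_ne_nil_iff x _ z]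
  rw [pvPos_take x (data.drop z.toNat) ((z + k).toNat - z.toNat) z]
  have hdrop : pvPos x (data.drop z.toNat) z = (pvPos x data 0).filter (fun p => decide (z ≤ p)) := by
    have := pvPos_drop x data z.toNat 0
    rw [zero_add, hzz] at this
    exact this
  rw [hdrop]
  constructor
  · intro hne
    rcases List.exists_mem_of_ne_nil _ hne with ⟨p, hp⟩
    rcases List.mem_filter.1 hp with ⟨hp2, hp3⟩
    rcases List.mem_filter.1 hp2 with ⟨hp4, hp5⟩
    refine ⟨p, hp4, by simpa using hp5, ?_⟩
    have := of_decide_eq_true hp3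
    omega
  · rintro ⟨p, hp, h1, h2⟩
    intro hnil
    have : p ∈ ([] : List Int) := by
      rw [← hnil]
      refine List.mem_filter.2 ⟨List.mem_filter.2 ⟨hp, by simpa using h1⟩, ?_⟩
      simp only [decide_eq_true_eq]
      omega
    simp at this

-- the threshold fold computed over positions
theorem pvEnumFold (x : Int) :
    ∀ (l : List Int) (s : Int) (st : Int × Int),
      (PySem.List.enumerate l s).foldl
        (fun st ix => if ix.2 = x then (ix.1, max st.2 (ix.1 - st.1)) else st) st
      = (pvPos x l s).foldl (fun st p => (p, max st.2 (p - st.1))) st := by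
  intro l
  induction l with
  | nil => intro s st; simp [PySem.List.enumerate_nil, pvPos]
  | cons y ys ih =>
    intro s st
    rw [PySem.List.enumerate_cons]
    simp only [List.foldl_cons, pvPos]
    by_cases hy : y = x
    · rw [if_pos hy, if_pos hy, List.foldl_cons, ih]
    · rw [if_neg hy, if_neg hy, ih]

theorem pvGapFold :
    ∀ (ps : List Int) (prev t : Int), 0 ≤ t →
      ps.foldl (fun st p => (p, max st.2 (p - st.1))) (prev, t)
      = (pvLast prev ps, max t (pvMaxGap prev ps)) := by
  intro ps
  induction ps with
  | nil => intro prev t ht; simp [pvLast, pvMaxGap]; omega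
  | cons p rest ih =>
    intro prev t ht
    simp only [List.foldl_cons, pvLast, pvMaxGap]
    rw [ih p (max t (p - prev)) (by omega)]
    congr 1
    omega

theorem pvThreshold_eq (x : Int) (data : List Int) :
    pvThreshold x data
      = max (max 0 (pvMaxGap (-1) (pvPos x data 0)))
          ((data.length : Int) - pvLast (-1) (pvPos x data 0)) := by
  unfold pvThreshold
  rw [pvEnumFold x data 0 (-1, 0), pvGapFold (pvPos x data 0) (-1) 0 (by omega)]

theorem pvLast_mem : ∀ (ps : List Int) (prev : Int), ps ≠ [] → pvLast prev ps ∈ ps := by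
  intro ps
  induction ps with
  | nil => intro prev h; exact absurd rfl h
  | cons p rest ih =>
    intro prev _
    cases rest with
    | nil => simp [pvLast]
    | cons q t => exact List.mem_cons_of_mem _ (ih p (by simp))

theorem pvLast_ge (ps : List Int) (prev : Int) (hs : ps.Pairwise (· < ·)) :
    ∀ p ∈ ps, p ≤ pvLast prev ps := by
  induction ps generalizing prev with
  | nil => intro p hp; simp at hp
  | cons q t ih =>
    intro p hp
    rcases List.pairwise_cons.1 hs with ⟨hq, ht⟩
    have hlast : pvLast prev (q :: t) = pvLast q t := rfl
    rcases List.mem_cons.1 hp with rfl | hp'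
    · rw [hlast]
      cases t with
      | nil => simp [pvLast]
      | cons r u =>
        have : pvLast p (r :: u) ∈ r :: u := pvLast_mem (r :: u) p (by simp)
        exact le_of_lt (hq _ this)
    · rw [hlast]
      exact ih q ht p hp'

-- core ⇐ : small gaps give an occurrence in every window
theorem pvCoreBack (k : Int) :
    ∀ (ps : List Int) (prev z : Int), prev < z → (∃ p ∈ ps, z ≤ p) →
      pvMaxGap prev ps ≤ k → ∃ p ∈ ps, z ≤ p ∧ p < z + k := by
  intro ps
  induction ps with
  | nil =>
    rintro prev z _ ⟨p, hp, _⟩ _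
    simp at hp
  | cons p t ih =>
    rintro prev z hpz ⟨q, hq, hzq⟩ hgap
    simp only [pvMaxGap, max_le_iff] at hgap
    by_cases hzp : z ≤ p
    · exact ⟨p, List.mem_cons_self, hzp, by omega⟩
    · have hq' : q ∈ t := by
        rcases List.mem_cons.1 hq with rfl | h
        · omega
        · exact h
      obtain ⟨r, hr, h1, h2⟩ := ih p z (by omega) ⟨q, hq', hzq⟩ hgap.2
      exact ⟨r, List.mem_cons_of_mem _ hr, h1, h2⟩

-- core ⇒ : occurrence in every window bounds every gap
theorem pvCoreFwd (k L : Int) (hk0 : 0 ≤ k) :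
    ∀ (ps : List Int) (prev : Int),
      ps.Pairwise (· < ·) → (∀ p ∈ ps, prev < p) → (∀ p ∈ ps, p < L) →
      (∀ z : Int, prev < z → z ≤ L - k → ∃ p ∈ ps, z ≤ p ∧ p < z + k) →
      pvMaxGap prev ps ≤ k := by
  intro ps
  induction ps with
  | nil => intro prev _ _ _ _; simp [pvMaxGap]; omega
  | cons p t ih =>
    intro prev hpw hlow hhigh hc
    rcases List.pairwise_cons.1 hpw with ⟨hhd, htl⟩
    simp only [pvMaxGap, max_le_iff]
    constructor
    · by_contra hbig
      push Not at hbig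
      have hp1 : prev < p := hlow p List.mem_cons_self
      have hp2 : p < L := hhigh p List.mem_cons_self
      obtain ⟨q, hq, h1, h2⟩ := hc (prev + 1) (by omega) (by omega)
      have : p ≤ q := by
        rcases List.mem_cons.1 hq with rfl | h
        · exact le_refl _
        · exact le_of_lt (hhd q h)
      omega
    · apply ih p htl
      · intro q hq; exact hhd q hq
      · intro q hq; exact hhigh q (List.mem_cons_of_mem _ hq)
      · intro z hz1 hz2
        have hp1 : prev < p := hlow p List.mem_cons_self
        obtain ⟨q, hq, h1, h2⟩ := hc z (by omega) hz2
        have hq' : q ∈ t := by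
          rcases List.mem_cons.1 hq with rfl | h
          · omega
          · exact h
        exact ⟨q, hq', h1, h2⟩

-- the window condition, characterised by the threshold
theorem pvWindows_iff (x : Int) (data : List Int) (k : Int)
    (hk1 : 1 ≤ k) (hkL : k ≤ (data.length : Int)) :
    (∀ z : Int, 0 ≤ z → z < (data.length : Int) - k + 1 →
        x ∈ PySem.List.slice data (some z) (some (z + k)))
      ↔ (x ∈ data ∧ pvThreshold x data ≤ k) := by
  have hk0 : (0 : Int) ≤ k := by omega
  have hpw := pvPos_pairwise x data 0
  constructor
  · intro h
    have hx : x ∈ data := by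
      obtain ⟨p, hp, _, _⟩ := (pvMemSlice x data 0 k (by omega) hk0).1 (h 0 (by omega) (by omega))
      exact (pvPos_ne_nil_iff x data 0).1 (by intro hnil; rw [hnil] at hp; simp at hp)
    refine ⟨hx, ?_⟩
    rw [pvThreshold_eq]
    have hgap : pvMaxGap (-1) (pvPos x data 0) ≤ k := by
      apply pvCoreFwd k (data.length : Int) hk0 (pvPos x data 0) (-1) hpw
      · intro p hp; have := pvPos_bounds x data 0 p hp; omega
      · intro p hp; have := pvPos_bounds x data 0 p hp; omega
      · intro z hz1 hz2
        exact (pvMemSlice x data z k (by omega) hk0).1 (h z (by omega) (by omega))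
    have hlast : (data.length : Int) - pvLast (-1) (pvPos x data 0) ≤ k := by
      obtain ⟨p, hp, h1, _⟩ := (pvMemSlice x data ((data.length : Int) - k) k (by omega) hk0).1
        (h ((data.length : Int) - k) (by omega) (by omega))
      have := pvLast_ge (pvPos x data 0) (-1) hpw p hp
      omega
    simp only [max_le_iff]
    exact ⟨⟨hk0, hgap⟩, hlast⟩
  · rintro ⟨hx, hT⟩ z hz1 hz2
    rw [pvThreshold_eq] at hT
    simp only [max_le_iff] at hT
    obtain ⟨⟨_, hgap⟩, hlast⟩ := hT
    rw [pvMemSlice x data z k hz1 hk0]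
    have hne : pvPos x data 0 ≠ [] := (pvPos_ne_nil_iff x data 0).2 hx
    have hlm : pvLast (-1) (pvPos x data 0) ∈ pvPos x data 0 := pvLast_mem _ _ hne
    apply pvCoreBack k (pvPos x data 0) (-1) z (by omega)
    · exact ⟨pvLast (-1) (pvPos x data 0), hlm, by omega⟩
    · exact hgap

-- intersection fold membership
theorem pvMemFoldInter (x : Int) :
    ∀ (ts : List (PySem.Set Int)) (s : PySem.Set Int),
      x ∈ ts.foldl (fun acc t => PySem.Set.inter acc t) s ↔ x ∈ s ∧ ∀ t ∈ ts, x ∈ t := by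
  intro ts
  induction ts with
  | nil => intro s; simp
  | cons t ts ih =>
    intro s
    rw [List.foldl_cons, ih, PySem.Set.mem_inter, List.forall_mem_cons]
    tauto

-- the memo dict built by B
theorem pvThrGetAux (data : List Int) :
    ∀ (l : List Int) (d : PySem.Dict Int Int) (x : Int),
      (l.foldl (fun thr v => if thr.contains v then thr else thr.insert v (pvThreshold v data)) d).get? x
        = match d.get? x with
          | some w => some w
          | none => if x ∈ l then some (pvThreshold x data) else none := by
  intro l
  induction l with
  | nil =>
    intro d x
    simp only [List.foldl_nil, List.not_mem_nil, if_false]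
    cases d.get? x <;> rfl
  | cons v t ih =>
    intro d x
    rw [List.foldl_cons]
    by_cases hc : d.contains v = true
    · rw [if_pos hc, ih d x]
      cases hdx : d.get? x with
      | some w => rfl
      | none =>
        have hxv : x ≠ v := by
          rintro rfl
          rw [(PySem.Dict.get?_eq_none_iff_contains d x).1 hdx] at hc
          simp at hc
        simp [List.mem_cons, hxv]
    · rw [if_neg hc]
      rw [ih (d.insert v (pvThreshold v data)) x]
      rw [PySem.Dict.get?_insert]
      by_cases hxv : x = v
      · subst hxv
        rw [if_pos rfl]
        have : d.get? x = none := (PySem.Dict.get?_eq_none_iff_contains d x).2 (by simpa using hc)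
        rw [this]
        simp
      · rw [if_neg hxv]
        cases hdx : d.get? x with
        | some w => rfl
        | none => simp [List.mem_cons, hxv]

theorem pvThrGet (data : List Int) (x : Int) :
    (data.foldl (fun thr v => if thr.contains v then thr else thr.insert v (pvThreshold v data))
        PySem.Dict.empty).get? x
      = if x ∈ data then some (pvThreshold x data) else none := by
  rw [pvThrGetAux data data PySem.Dict.empty x, PySem.Dict.get?_empty]

-- min with default over lists with the same members
theorem pvMinCongr (l₁ l₂ : List Int) (h : ∀ y : Int, y ∈ l₁ ↔ y ∈ l₂) :
    (PySem.List.min? l₁ (fun x => x)).getD (-1) = (PySem.List.min? l₂ (fun x => x)).getD (-1) := by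
  cases h1 : PySem.List.min? l₁ (fun x => x) with
  | none =>
    have : l₁ = [] := (PySem.List.min?_eq_none_iff l₁ _).1 h1
    subst this
    have : l₂ = [] := by
      cases l₂ with
      | nil => rfl
      | cons a t => exact absurd ((h a).2 List.mem_cons_self) (List.not_mem_nil)
    subst this
    rfl
  | some m₁ =>
    have hm₁ : m₁ ∈ l₁ := PySem.List.min?_mem h1
    cases h2 : PySem.List.min? l₂ (fun x => x) with
    | none =>
      have : l₂ = [] := (PySem.List.min?_eq_none_iff l₂ _).1 h2
      subst this
      exact absurd ((h m₁).1 hm₁) (List.not_mem_nil)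
    | some m₂ =>
      have hm₂ : m₂ ∈ l₂ := PySem.List.min?_mem h2
      have h12 : m₁ ≤ m₂ := PySem.List.min?_isMin h1 m₂ ((h m₂).2 hm₂)
      have h21 : m₂ ≤ m₁ := PySem.List.min?_isMin h2 m₁ ((h m₁).1 hm₁)
      simp [le_antisymm h12 h21]

-- A's if-chain is min-with-default
theorem pvChain (l : List Int) :
    (if l = [] then (-1 : Int) else if l.length = 1 then l.headD 0
     else (PySem.List.min? l (fun x => x)).getD 0)
      = (PySem.List.min? l (fun x => x)).getD (-1) := by
  match l with
  | [] =>
    rw [if_pos rfl, (PySem.List.min?_eq_none_iff ([] : List Int) _).2 rfl]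
    rfl
  | [a] =>
    rw [if_neg (by simp), if_pos (by simp), PySem.List.min?_id_cons]
    simp
  | a :: b :: t =>
    rw [if_neg (by simp), if_neg (by simp), PySem.List.min?_id_cons]
    rfl

-- generic: a foldl whose step is pointwise an append-singleton is a map
theorem pvFoldlAppend' {α β : Type} (g : List β → α → List β) (f : α → β)
    (h : ∀ (r : List β) (x : α), g r x = r ++ [f x]) :
    ∀ (l : List α) (acc : List β), l.foldl g acc = acc ++ l.map f := by
  intro l
  induction l with
  | nil => intro acc; simp
  | cons y ys ih => intro acc; rw [List.foldl_cons, h, ih]; simp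

-- the value appended by A's loop body at window size k
def pvEntryA (data : List Int) (k : Int) : Int :=
  let memo : List (List Int) :=
    (PySem.List.pyRange 0 ((data.length : Int) - k + 1) 1).foldl
      (fun memo z => memo ++ [PySem.List.slice data (some z) (some (z + k))]) []
  let memoSet : List (PySem.Set Int) := memo.map (fun lst => PySem.Set.ofList lst)
  let common : List Int :=
    match memoSet with
    | [] => []
    | s :: rest => rest.foldl (fun acc t => PySem.Set.inter acc t) s
  if common = [] then -1
  else if common.length = 1 then common.headD 0
  else (PySem.List.min? common (fun x => x)).getD 0

-- the value appended by B's loop body at window size k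
def pvEntryB (data : List Int) (k : Int) : Int :=
  let thr : PySem.Dict Int Int :=
    data.foldl (fun thr v => if thr.contains v then thr else thr.insert v (pvThreshold v data))
      PySem.Dict.empty
  let candidates : List Int := thr.keys.filter (fun v => decide (thr.getD v 0 ≤ k))
  match PySem.List.min? candidates (fun x => x) with
  | some m => m
  | none => -1

theorem pvEntry_eq (data : List Int) (k : Int) (h1 : 1 ≤ k) (h2 : k ≤ (data.length : Int)) :
    pvEntryA data k = pvEntryB data k := by
  unfold pvEntryA pvEntryB
  rw [pvFoldlAppend (fun z => PySem.List.slice data (some z) (some (z + k)))]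
  rw [PySem.List.pyRange_one_cons (show (0 : Int) < (data.length : Int) - k + 1 by omega)]
  simp only [List.nil_append, List.map_cons, List.map_map, Function.comp_def]
  have h01 : (0 : Int) + 1 = 1 := by norm_num
  rw [h01]
  rw [pvChain]
  have hmatch : ∀ (c : List Int),
      (match PySem.List.min? c (fun x => x) with
       | some m => m
       | none => (-1 : Int)) = (PySem.List.min? c (fun x => x)).getD (-1) := by
    intro c; cases PySem.List.min? c (fun x => x) <;> rfl
  rw [hmatch]
  apply pvMinCongr
  intro y
  rw [pvMemFoldInter]
  have hcommon :
      (y ∈ PySem.Set.ofList (PySem.List.slice data (some 0) (some (0 + k))) ∧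
        ∀ t ∈ (PySem.List.pyRange 1 ((data.length : Int) - k + 1) 1).map
            (fun z => PySem.Set.ofList (PySem.List.slice data (some z) (some (z + k)))), y ∈ t)
        ↔ (y ∈ data ∧ pvThreshold y data ≤ k) := by
    rw [← pvWindows_iff y data k h1 h2]
    constructor
    · rintro ⟨h0, hrest⟩ z hz0 hzlt
      rcases eq_or_lt_of_le hz0 with rfl | hzpos
      · exact (PySem.Set.mem_ofList _ y).1 h0
      · have hz : z ∈ PySem.List.pyRange 1 ((data.length : Int) - k + 1) 1 :=
          (PySem.List.mem_pyRange_one).2 ⟨by omega, hzlt⟩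
        have := hrest _ (List.mem_map_of_mem hz)
        exact (PySem.Set.mem_ofList _ y).1 this
    · intro h
      refine ⟨(PySem.Set.mem_ofList _ y).2 (h 0 (by omega) (by omega)), ?_⟩
      intro t ht
      rcases List.mem_map.1 ht with ⟨z, hz, rfl⟩
      rcases (PySem.List.mem_pyRange_one).1 hz with ⟨hz1, hz2⟩
      exact (PySem.Set.mem_ofList _ y).2 (h z (by omega) hz2)
  rw [hcommon]
  have hget := pvThrGet data y
  set thr := data.foldl
      (fun thr v => if thr.contains v then thr else thr.insert v (pvThreshold v data))
      PySem.Dict.empty with hthr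
  rw [List.mem_filter]
  by_cases hy : y ∈ data
  · rw [if_pos hy] at hget
    have hkeys : y ∈ thr.keys := by
      by_contra hk
      rw [(PySem.Dict.get?_eq_none_iff_not_mem_keys thr y).2 hk] at hget
      simp at hget
    have hgd : thr.getD y 0 = pvThreshold y data := by
      rw [PySem.Dict.getD_eq_get?_getD, hget]; rfl
    simp [hy, hkeys, hgd]
  · rw [if_neg hy] at hget
    have hkeys : y ∉ thr.keys := (PySem.Dict.get?_eq_none_iff_not_mem_keys thr y).1 hget
    simp [hy, hkeys]

-- ===== VERDICT (by name: the statement is the Claim_ definition above) =====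
theorem minCommon_spec : Claim_equal_minCommon := by
  intro n data _ hpre
  unfold Pre_minCommon at hpre
  unfold Spec_minCommon minCommon minCommon_alt
  rw [pvFoldlAppend' _ (fun i => pvEntryA data (i + 1))
        (by intro r i; unfold pvEntryA; dsimp only; split_ifs <;> rfl),
      pvFoldlAppend' _ (fun kk => pvEntryB data kk)
        (by intro r kk; unfold pvEntryB; rfl)]
  simp only [List.nil_append]
  rw [PySem.List.pyRange_one 0 n, PySem.List.pyRange_one 1 (n + 1)]
  have hsub : n + 1 - 1 = n := by ring
  have hsub0 : n - 0 = n := by ring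
  rw [hsub, hsub0, List.map_map, List.map_map]
  apply List.map_congr_left
  intro j hj
  have hj' : j < n.toNat := List.mem_range.1 hj
  simp only [Function.comp]
  have e1 : (0 : Int) + (j : Int) + 1 = (j : Int) + 1 := by ring
  have e2 : (1 : Int) + (j : Int) = (j : Int) + 1 := by ring
  rw [e1, e2]
  exact pvEntry_eq data ((j : Int) + 1) (by omega) (by omega)
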